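-- pv_equiv track=rewrite | github.com/MettaTan/digital-product-wizard | app.py | trim_incomplete_sentence
-- ===== SOURCE A (Python) =====
-- def trim_incomplete_sentence(text: str) -> str:
--     """
--     Trims the final sentence if it ends mid-way (i.e. no punctuation).
--     """
--     if not text.strip():
--         return text
--
--     endings = [".", "!", "?"]
--     last_good = max(text.rfind(e) for e in endings)
--
--     # If no complete sentence found, return as-is
--     if last_good == -1:
--         return text
--
--     return text[:last_good + 1]
-- ===== SOURCE B (Python) =====
-- def trim_incomplete_sentence(text: str) -> str:
--     # Single early-exiting backward scan instead of three full rfind passes.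
--     for i in range(len(text) - 1, -1, -1):
--         if text[i] in ".!?":
--             return text[:i + 1]
--     return text
-- ===== Notes on version B (the rewrite author's own statement) =====
-- stated objective: idiomatic
-- what changed: Replaces the strip guard plus three full rfind scans and a max with one early-exiting backward scan that returns at the first sentence-ending character.
import Mathlib
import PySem

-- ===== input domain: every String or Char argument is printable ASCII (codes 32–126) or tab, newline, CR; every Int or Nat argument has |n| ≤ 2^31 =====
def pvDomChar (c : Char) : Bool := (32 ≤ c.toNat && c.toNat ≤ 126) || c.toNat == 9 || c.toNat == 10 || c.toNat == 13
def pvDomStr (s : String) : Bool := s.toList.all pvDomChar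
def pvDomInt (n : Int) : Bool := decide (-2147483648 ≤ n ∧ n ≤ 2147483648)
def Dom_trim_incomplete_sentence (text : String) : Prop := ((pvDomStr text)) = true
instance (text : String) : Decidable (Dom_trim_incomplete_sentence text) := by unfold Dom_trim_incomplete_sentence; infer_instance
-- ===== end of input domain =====

-- B replaces A's strip guard + three full rfind scans + max by one early-exiting backward scan (idiomatic single pass; same result).

-- ===== PORT A =====
def trim_incomplete_sentence (text : String) : String :=
  if PySem.Str.strip text = "" then text
  else
    -- max over the generator (text.rfind(e) for e in [".", "!", "?"]) = left-nested binary max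
    let lastGood : Int :=
      max (max (PySem.Str.rfind text ".") (PySem.Str.rfind text "!")) (PySem.Str.rfind text "?")
    if lastGood = -1 then text
    else PySem.Str.slice text none (some (lastGood + 1))

-- ===== PORT B =====
def pvIsEnd (c : Char) : Bool := c == '.' || c == '!' || c == '?'

-- the reverse loop `for i in range(len(text)-1, -1, -1)`: fuel = current index + 1
def pvScanBack (cs : List Char) : Nat → Option Nat
  | 0 => none
  | i+1 => if pvIsEnd (cs.getD i ' ') then some i else pvScanBack cs i

def trim_incomplete_sentence_alt (text : String) : String :=
  match pvScanBack text.toList text.toList.length with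
  | some i => PySem.Str.slice text none (some ((i : Int) + 1))
  | none => text

-- ===== PRECONDITION & SPEC =====
def Spec_trim_incomplete_sentence (text : String) (out : String) : Prop := out = trim_incomplete_sentence_alt text
instance (text : String) (out : String) : Decidable (Spec_trim_incomplete_sentence text out) := by unfold Spec_trim_incomplete_sentence; infer_instance

-- ===== CLAIM (what is proved, stated in full; the proofs are below) =====
def Claim_equal_trim_incomplete_sentence : Prop := ∀ (text : String), Dom_trim_incomplete_sentence text → Spec_trim_incomplete_sentence text (trim_incomplete_sentence text)

-- ===== LEMMAS AND PROOFS =====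

-- a one-character pattern is a prefix of cs.drop j exactly when the character at j is it (c ≠ ' ' covers the out-of-range default)
theorem pv_char_at (cs : List Char) (c : Char) (hc : c ≠ ' ') (j : Nat) (hj : j ≤ cs.length) :
    [c].isPrefixOf (cs.drop j) = (cs[j]?.getD ' ' == c) := by
  rcases Nat.lt_or_ge j cs.length with h | h
  · rw [← List.getElem_cons_drop h]
    simp [List.isPrefixOf, List.getElem?_eq_getElem h, eq_comm]
  · have : j = cs.length := le_antisymm hj h
    subst this
    simp
    exact fun h => hc h.symm

theorem pv_char_at0 (cs : List Char) (c : Char) (hc : c ≠ ' ') :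
    [c].isPrefixOf cs = (cs[0]?.getD ' ' == c) := by
  simpa using pv_char_at cs c hc 0 (Nat.zero_le _)

theorem pv_go_le (cs sub : List Char) : ∀ k, PySem.Chars.rfind.go cs sub k ≤ (k : Int) := by
  intro k
  induction k with
  | zero => simp [PySem.Chars.rfind.go]; split <;> simp
  | succ j ih =>
    simp [PySem.Chars.rfind.go]
    split
    · simp
    · exact le_trans ih (by omega)

-- the left-nested max of the three rfind scans with fuel k equals the backward scan from index k
theorem pv_key (cs : List Char) : ∀ k, k ≤ cs.length →
    max (max (PySem.Chars.rfind.go cs ['.'] k) (PySem.Chars.rfind.go cs ['!'] k))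
        (PySem.Chars.rfind.go cs ['?'] k)
      = (match pvScanBack cs (k+1) with | some i => (i : Int) | none => -1) := by
  intro k
  induction k with
  | zero =>
    intro _
    simp only [PySem.Chars.rfind.go, pvScanBack, List.getD,
      pv_char_at0 cs '.' (by decide), pv_char_at0 cs '!' (by decide), pv_char_at0 cs '?' (by decide)]
    generalize cs[0]?.getD ' ' = x
    by_cases h1 : x = '.' <;> by_cases h2 : x = '!' <;> by_cases h3 : x = '?' <;>
      simp [h1, h2, h3, pvIsEnd]
  | succ j ih =>
    intro hk
    have hj : j ≤ cs.length := Nat.le_of_succ_le hk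
    have hle1 := pv_go_le cs ['.'] j
    have hle2 := pv_go_le cs ['!'] j
    have hle3 := pv_go_le cs ['?'] j
    have ihj := ih hj
    simp only [PySem.Chars.rfind.go]
    rw [pv_char_at cs '.' (by decide) (j+1) hk, pv_char_at cs '!' (by decide) (j+1) hk,
        pv_char_at cs '?' (by decide) (j+1) hk]
    conv_rhs => rw [show j + 1 + 1 = (j+1) + 1 from rfl]
    simp only [pvScanBack, List.getD]
    generalize cs[(j+1)]?.getD ' ' = x
    by_cases h1 : x = '.'
    · subst h1
      simp only [pvIsEnd, beq_self_eq_true, if_true, show (('.':Char) == '!') = false from rfl,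
        show (('.':Char) == '?') = false from rfl, Bool.false_eq_true, if_false,
        Bool.true_or, Nat.cast_add, Nat.cast_one]
      rw [max_eq_left (by omega), max_eq_left (by omega)]
    · by_cases h2 : x = '!'
      · subst h2
        simp only [pvIsEnd, beq_self_eq_true, show (('!':Char) == '.') = false from rfl,
          show (('!':Char) == '?') = false from rfl, Bool.false_eq_true, if_false, if_true,
          Bool.true_or, Bool.or_true, Nat.cast_add, Nat.cast_one]
        rw [max_eq_left (by omega), max_eq_right (by omega)]
      · by_cases h3 : x = '?'
        · subst h3
          simp only [pvIsEnd, beq_self_eq_true, show (('?':Char) == '.') = false from rfl,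
            show (('?':Char) == '!') = false from rfl, Bool.false_eq_true, if_false, if_true,
            Bool.or_true, Nat.cast_add, Nat.cast_one]
          rw [max_eq_right (by omega)]
        · have e1 : (x == '.') = false := by simp [h1]
          have e2 : (x == '!') = false := by simp [h2]
          have e3 : (x == '?') = false := by simp [h3]
          simp only [e1, e2, e3, pvIsEnd, Bool.false_eq_true, if_false, Bool.or_self]
          exact ihj

theorem pv_scan_none (cs : List Char) (hall : ∀ c ∈ cs, PySem.Chars.isspace c = true) :
    ∀ k, pvScanBack cs k = none := by
  intro k
  induction k with
  | zero => rfl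
  | succ j ih =>
    simp only [pvScanBack, ih]
    have : pvIsEnd (cs.getD j ' ') = false := by
      rcases Nat.lt_or_ge j cs.length with h | h
      · have hm : cs.getD j ' ' ∈ cs := by
          rw [List.getD_eq_getElem cs ' ' h]; exact List.getElem_mem h
        have := hall _ hm
        revert this
        generalize cs.getD j ' ' = c
        intro hsp
        by_contra hend
        rw [Bool.not_eq_false] at hend
        rcases (by simpa [pvIsEnd, or_assoc] using hend : c = '.' ∨ c = '!' ∨ c = '?') with h | h | h <;>
          subst h <;> simp [PySem.Chars.isspace] at hsp
      · rw [List.getD_eq_default _ _ h]; decide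
    simp only [List.getD] at this
    simp [this]

theorem pv_strip_all_space (cs : List Char) (h : PySem.Chars.strip cs = []) :
    ∀ c ∈ cs, PySem.Chars.isspace c = true := by
  intro c hc
  unfold PySem.Chars.strip PySem.Chars.rstrip PySem.Chars.lstrip at h
  rw [List.reverse_eq_nil_iff, List.dropWhile_eq_nil_iff] at h
  have hsplit := List.takeWhile_append_dropWhile (p := PySem.Chars.isspace) (l := cs)
  rw [← hsplit] at hc
  rcases List.mem_append.mp hc with h1 | h1
  · exact List.mem_takeWhile_imp h1
  · exact h c (List.mem_reverse.mpr h1)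

-- ===== VERDICT (by name: the statement is the Claim_ definition above) =====
theorem trim_incomplete_sentence_spec : Claim_equal_trim_incomplete_sentence := by
  unfold Claim_equal_trim_incomplete_sentence Spec_trim_incomplete_sentence
  intro text _
  unfold trim_incomplete_sentence trim_incomplete_sentence_alt
  set cs := text.toList with hcs
  have hrf : ∀ sub : List Char, PySem.Chars.rfind cs sub = PySem.Chars.rfind.go cs sub cs.length := fun _ => rfl
  have hkey := pv_key cs cs.length (le_refl _)
  have hsucc : pvScanBack cs (cs.length + 1) = pvScanBack cs cs.length := by
    simp [pvScanBack, pvIsEnd]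
  rw [hsucc] at hkey
  have hmax : max (max (PySem.Str.rfind text ".") (PySem.Str.rfind text "!")) (PySem.Str.rfind text "?")
      = (match pvScanBack cs cs.length with | some i => (i : Int) | none => -1) := by
    rw [← hkey]
    simp [PySem.Str.rfind_eq, ← hcs, hrf]
  cases hsc : pvScanBack cs cs.length with
  | none =>
    rw [hsc] at hmax
    have hm : max (max (PySem.Str.rfind text ".") (PySem.Str.rfind text "!")) (PySem.Str.rfind text "?") = -1 := hmax
    simp only [hm]
    simp
  | some i =>
    rw [hsc] at hmax
    have hstrip : ¬ (PySem.Str.strip text = "") := by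
      intro hemp
      have h2 : PySem.Chars.strip cs = [] := by
        rw [hcs, ← PySem.Str.toList_strip, hemp]; rfl
      have := pv_scan_none cs (pv_strip_all_space cs h2) cs.length
      rw [this] at hsc
      simp at hsc
    simp only [hstrip, if_false, hmax]
    have : ¬ ((i : Int) = -1) := by omega
    simp [this]
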